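-- pv_equiv track=rewrite | github.com/981377660LMT/algorithm-study | 15_双指针/经典题/Partition String.py | solve
-- ===== SOURCE A (Python) =====
-- from typing import List
--
-- def solve(s: str) -> List[int]:
--     last = {char: index for index, char in enumerate(s)}
--     res = []
--     lower, upper = 0, 0
--
--     for index, char in enumerate(s):
--         upper = max(upper, last[char])
--         if index == upper:
--             res.append(upper - lower + 1)
--             lower = upper = index + 1
--
--     return res
-- ===== SOURCE B (Python) =====
-- from typing import List
--
-- def solve(s: str) -> List[int]:
--     # Interval-merging reformulation: one [first, last] interval per distinct
--     # character, merged in first-appearance order.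
--     last = {}
--     seen = set()
--     starts = []  # (first_index, char) for each distinct char, in first-appearance order
--     for i, c in enumerate(s):
--         if c not in seen:
--             seen.add(c)
--             starts.append((i, c))
--         last[c] = i
--
--     res = []
--     cur = None
--     for f, c in starts:
--         l = last[c]
--         if cur is None:
--             cur = (f, l)
--         elif f <= cur[1]:
--             cur = (cur[0], max(cur[1], l))
--         else:
--             res.append(cur[1] - cur[0] + 1)
--             cur = (f, l)
--     if cur is not None:
--         res.append(cur[1] - cur[0] + 1)
--     return res
-- ===== Notes on version B (the rewrite author's own statement) =====
-- stated objective: alternative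
-- what changed: Replaces the single expanding-window sweep (running max of last occurrences, emit when the index reaches it) by an explicit interval construction: one [first,last] interval per distinct character collected in first-appearance order, then a separate merge pass over these few intervals that emits a part size whenever the next interval starts beyond the current merged end.
import Mathlib
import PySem

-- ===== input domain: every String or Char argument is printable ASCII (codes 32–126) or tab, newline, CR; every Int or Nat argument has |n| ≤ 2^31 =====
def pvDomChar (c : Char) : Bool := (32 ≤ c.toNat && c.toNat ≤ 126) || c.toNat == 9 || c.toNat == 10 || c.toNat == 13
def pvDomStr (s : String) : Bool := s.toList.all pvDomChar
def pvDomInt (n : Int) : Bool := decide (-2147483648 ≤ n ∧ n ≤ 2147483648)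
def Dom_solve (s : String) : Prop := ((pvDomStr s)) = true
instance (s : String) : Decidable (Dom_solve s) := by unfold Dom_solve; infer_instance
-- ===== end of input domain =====

-- B replaces A's expanding-window sweep by building per-character [first,last] intervals and merging
-- them in first-appearance order (objective: alternative; same output proved for every string).

-- ===== PORT A =====
-- last = {char: index for index, char in enumerate(s)}  (shared by both ports: B's loop body 'last[c] = i' builds the same dict)
def lastDict (cs : List Char) : PySem.Dict Char Int :=
  (PySem.List.enumerate cs 0).foldl (fun d p => d.insert p.2 p.1) PySem.Dict.empty

def solve (s : String) : List Int :=
  let cs := s.toList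
  let last := lastDict cs
  let r := (PySem.List.enumerate cs 0).foldl
    (fun (st : List Int × Int × Int) p =>
      let upper := max st.2.2 (last.getD p.2 0)
      if p.1 == upper then (st.1 ++ [upper - st.2.1 + 1], (p.1 + 1, p.1 + 1))
      else (st.1, (st.2.1, upper)))
    ([], (0, 0))
  r.1

-- ===== PORT B =====
def solve_alt (s : String) : List Int :=
  let cs := s.toList
  -- one pass collecting: seen (set), starts = [(first_index, char)] in first-appearance order, last dict
  let t := (PySem.List.enumerate cs 0).foldl
    (fun (t : PySem.Dict Char Int × PySem.Set Char × List (Int × Char)) p =>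
      let seen := t.2.1
      let starts := if PySem.Set.contains seen p.2 then t.2.2 else t.2.2 ++ [p]
      (t.1.insert p.2 p.1, PySem.Set.add seen p.2, starts))
    (PySem.Dict.empty, PySem.Set.empty, [])
  -- merge the intervals (f, last[c]) in first-appearance order
  let st := t.2.2.foldl
    (fun (st : List Int × Option (Int × Int)) fc =>
      let l := t.1.getD fc.2 0
      match st.2 with
      | none => (st.1, some (fc.1, l))
      | some cur =>
        if fc.1 ≤ cur.2 then (st.1, some (cur.1, max cur.2 l))
        else (st.1 ++ [cur.2 - cur.1 + 1], some (fc.1, l)))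
    ([], none)
  match st.2 with
  | none => st.1
  | some cur => st.1 ++ [cur.2 - cur.1 + 1]

-- ===== PRECONDITION & SPEC =====
def Spec_solve (s : String) (out : List Int) : Prop := out = solve_alt s
instance (s : String) (out : List Int) : Decidable (Spec_solve s out) := by unfold Spec_solve; infer_instance

-- ===== CLAIM (what is proved, stated in full; the proofs are below) =====
def Claim_equal_solve : Prop := ∀ (s : String), Dom_solve s → Spec_solve s (solve s)

-- ===== LEMMAS AND PROOFS =====

-- last-occurrence value of the character at position i
def LI (cs : List Char) (i : Nat) : Int := (lastDict cs).getD (cs.getD i ' ') 0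
-- running maximum of last-occurrence values over the first k positions
def Gp (cs : List Char) (k : Nat) : Int :=
  ((cs.take k).map (fun c => (lastDict cs).getD c 0)).foldl max 0
-- position p is the first occurrence of its character
def isF (cs : List Char) (p : Nat) : Bool := !((cs.take p).contains (cs.getD p ' '))
-- cut positions (part boundaries) at or after k
def cutsFrom (cs : List Char) (k : Nat) : List Nat :=
  (List.range' k (cs.length - k)).filter (fun p => decide (Gp cs (p + 1) = (p : Int)))
-- part sizes from a list of cut positions, given the start of the current part
def sizesFrom (lo : Int) : List Nat → List Int
  | [] => []
  | c :: rest => ((c : Int) - lo + 1) :: sizesFrom ((c : Int) + 1) rest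
-- the first-occurrence (index, char) pairs at or after position q
def startsFrom (cs : List Char) (q : Nat) : List (Int × Char) :=
  ((List.range' q (cs.length - q)).filter (isF cs)).map (fun (p : Nat) => ((p : Int), cs.getD p ' '))

-- A's loop body after replacing enumerate by an index loop
def stepA (cs : List Char) (st : List Int × Int × Int) (j : Int) : List Int × Int × Int :=
  let upper := max st.2.2 ((lastDict cs).getD (PySem.List.pyGetD cs j ' ') 0)
  if j == upper then (st.1 ++ [upper - st.2.1 + 1], (j + 1, j + 1))
  else (st.1, (st.2.1, upper))

-- B's merge loop body over the starts list
def stepB (cs : List Char) (st : List Int × Option (Int × Int)) (fc : Int × Char) :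
    List Int × Option (Int × Int) :=
  let l := (lastDict cs).getD fc.2 0
  match st.2 with
  | none => (st.1, some (fc.1, l))
  | some cur =>
    if fc.1 ≤ cur.2 then (st.1, some (cur.1, max cur.2 l))
    else (st.1 ++ [cur.2 - cur.1 + 1], some (fc.1, l))

def finishB (st : List Int × Option (Int × Int)) : List Int :=
  match st.2 with
  | none => st.1
  | some cur => st.1 ++ [cur.2 - cur.1 + 1]

theorem lastDict_append (cs : List Char) (x : Char) :
    lastDict (cs ++ [x]) = (lastDict cs).insert x (cs.length : Int) := by
  simp [lastDict, PySem.List.enumerate_append, PySem.List.enumerate_cons,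
    PySem.List.enumerate_nil, List.foldl_append]

theorem lastDict_getD_lt (cs : List Char) (hn : 0 < cs.length) (c : Char) :
    (lastDict cs).getD c 0 < (cs.length : Int) := by
  induction cs using List.reverseRecOn with
  | nil => simp at hn
  | append_singleton cs x ih =>
    rw [lastDict_append, PySem.Dict.getD_insert]
    simp only [List.length_append, List.length_cons, List.length_nil]
    split_ifs with h
    · push_cast; omega
    · rcases Nat.eq_zero_or_pos cs.length with h0 | h0
      · rcases List.eq_nil_of_length_eq_zero h0 with rfl
        simp [lastDict, PySem.List.enumerate_nil, PySem.Dict.getD_empty]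
      · have := ih h0; push_cast; omega

theorem LI_bounds (cs : List Char) (i : Nat) (h : i < cs.length) :
    (i : Int) ≤ LI cs i ∧ LI cs i < (cs.length : Int) := by
  refine ⟨?_, lastDict_getD_lt cs (by omega) _⟩
  induction cs using List.reverseRecOn with
  | nil => simp at h
  | append_singleton cs x ih =>
    rw [LI, lastDict_append, PySem.Dict.getD_insert]
    by_cases hi : i < cs.length
    · rw [List.getD_append _ _ _ _ hi]
      split_ifs with hx
      · exact le_of_lt (by exact_mod_cast hi)
      · exact ih hi
    · have hie : i = cs.length := by simp at h; omega
      subst hie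
      have hx : (cs ++ [x]).getD cs.length ' ' = x := by
        simp [List.getD_eq_getElem?_getD]
      rw [hx, if_pos rfl]

theorem Gp_succ (cs : List Char) (k : Nat) (h : k < cs.length) :
    Gp cs (k + 1) = max (Gp cs k) (LI cs k) := by
  have ht : cs.take (k + 1) = cs.take k ++ [cs.getD k ' '] := by
    rw [List.take_succ]
    congr 1
    simp [List.getElem?_eq_getElem h, List.getD_eq_getElem?_getD]
  rw [Gp, ht, List.map_append, List.foldl_append]
  rfl

theorem LI_le_Gp (cs : List Char) {i k : Nat} (hik : i < k) (hi : i < cs.length) :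
    LI cs i ≤ Gp cs k := by
  have hmem : cs.getD i ' ' ∈ cs.take k := by
    have hi' : i < (cs.take k).length := by simp; omega
    have : (cs.take k)[i] = cs.getD i ' ' := by
      rw [List.getElem_take, List.getD_eq_getElem?_getD, List.getElem?_eq_getElem hi]
      rfl
    rw [← this]
    exact List.getElem_mem hi'
  exact (PySem.List.le_foldl_max _ _).2 _ (List.mem_map_of_mem hmem)

theorem Gp_ge (cs : List Char) (k : Nat) (h : k < cs.length) :
    (k : Int) ≤ Gp cs (k + 1) := by
  rw [Gp_succ cs k h]
  calc (k : Int) ≤ LI cs k := (LI_bounds cs k h).1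
    _ ≤ max (Gp cs k) (LI cs k) := le_max_right _ _

theorem Gp_lt (cs : List Char) (k : Nat) (hn : 0 < cs.length) :
    Gp cs k < (cs.length : Int) := by
  rcases PySem.List.foldl_max_mem ((cs.take k).map (fun c => (lastDict cs).getD c 0)) 0 with h | h
  · rw [Gp, h]; exact_mod_cast hn
  · rw [Gp]
    rcases List.mem_map.1 h with ⟨c, _, hc⟩
    rw [← hc]
    exact lastDict_getD_lt cs hn c

theorem Gp_top (cs : List Char) (hn : 0 < cs.length) :
    Gp cs cs.length = (cs.length : Int) - 1 := by
  have h1 : ((cs.length - 1 : Nat) : Int) ≤ Gp cs cs.length := by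
    calc ((cs.length - 1 : Nat) : Int) ≤ LI cs (cs.length - 1) := (LI_bounds cs _ (by omega)).1
      _ ≤ Gp cs cs.length := LI_le_Gp cs (by omega) (by omega)
  have h2 := Gp_lt cs cs.length hn
  have : ((cs.length - 1 : Nat) : Int) = (cs.length : Int) - 1 := by push_cast [hn]; ring
  omega

theorem LI_nonfirst (cs : List Char) (p : Nat) (hp : p < cs.length) (h : isF cs p = false) :
    LI cs p ≤ Gp cs p := by
  have hmem : cs.getD p ' ' ∈ cs.take p := by
    simp only [isF, Bool.not_eq_false'] at h
    exact List.contains_iff_mem.mp h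
  rcases List.mem_iff_getElem.1 hmem with ⟨j, hj, hje⟩
  have hjp : j < p := by simp at hj; omega
  have hjl : j < cs.length := by simp at hj; omega
  have : LI cs p = LI cs j := by
    rw [LI, LI]
    congr 1
    have : cs.getD j ' ' = (cs.take p)[j] := by
      rw [List.getElem_take, List.getD_eq_getElem?_getD, List.getElem?_eq_getElem hjl]
      rfl
    rw [this, hje]
  rw [this]
  exact LI_le_Gp cs hjp hjl

theorem Gp_const_nonfirst (cs : List Char) (p : Nat) (hp : p < cs.length) (h : isF cs p = false) :
    Gp cs (p + 1) = Gp cs p := by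
  rw [Gp_succ cs p hp]
  exact max_eq_left (LI_nonfirst cs p hp h)

theorem first_after_cut (cs : List Char) (p : Nat) (hp : p + 1 < cs.length)
    (hc : Gp cs (p + 1) = (p : Int)) : isF cs (p + 1) = true := by
  by_cases hf : isF cs (p + 1) = true
  · exact hf
  · exfalso
    have h1 := LI_nonfirst cs (p + 1) hp (by simpa using hf)
    have h2 := (LI_bounds cs (p + 1) hp).1
    rw [hc] at h1
    push_cast at h1 h2
    omega

theorem cuts_split (cs : List Char) (a c : Nat) (hac : a ≤ c) (hc : c < cs.length)
    (hno : ∀ p, a ≤ p → p < c → Gp cs (p + 1) ≠ (p : Int))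
    (hcut : Gp cs (c + 1) = (c : Int)) :
    cutsFrom cs a = c :: cutsFrom cs (c + 1) := by
  have hsplit : List.range' a (cs.length - a) = List.range' a (c - a) ++ List.range' c (cs.length - c) := by
    have h1 : cs.length - a = (c - a) + (cs.length - c) := by omega
    have h2 : a + 1 * (c - a) = c := by omega
    rw [h1, ← List.range'_append, h2]
  have hc1 : cs.length - c = (cs.length - c - 1) + 1 := by omega
  rw [cutsFrom, hsplit, List.filter_append]
  have hnil : (List.range' a (c - a)).filter (fun p => decide (Gp cs (p + 1) = (p : Int))) = [] := by
    apply List.filter_eq_nil_iff.2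
    intro p hpmem
    rw [List.mem_range'_1] at hpmem
    simp only [decide_eq_true_eq]
    exact hno p hpmem.1 (by omega)
  rw [hnil, hc1, List.range'_succ, List.filter_cons]
  simp only [hcut, decide_true, List.nil_append]
  rw [cutsFrom]
  congr 2

theorem cutsFrom_succ_no (cs : List Char) (k : Nat) (hk : k < cs.length)
    (h : Gp cs (k + 1) ≠ (k : Int)) : cutsFrom cs k = cutsFrom cs (k + 1) := by
  have hc1 : cs.length - k = (cs.length - k - 1) + 1 := by omega
  rw [cutsFrom, hc1, List.range'_succ, List.filter_cons]
  simp only [h, decide_false, if_false]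
  rw [cutsFrom]
  congr 2

theorem startsFrom_succ (cs : List Char) (q : Nat) (hq : q < cs.length) :
    startsFrom cs q =
      (if isF cs q then [((q : Int), cs.getD q ' ')] else []) ++ startsFrom cs (q + 1) := by
  have hc1 : cs.length - q = (cs.length - q - 1) + 1 := by omega
  rw [startsFrom, hc1, List.range'_succ, List.filter_cons]
  by_cases h : isF cs q
  · simp only [h, if_true, List.map_cons, List.singleton_append]
    rw [startsFrom]
    congr 3
  · simp only [h, if_false, Bool.false_eq_true, List.nil_append]
    rw [startsFrom]
    congr 3

theorem isF_append_lt (cs : List Char) (x : Char) (p : Nat) (hp : p < cs.length) :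
    isF (cs ++ [x]) p = isF cs p := by
  rw [isF, isF, List.take_append_of_le_length (by omega), List.getD_append _ _ _ _ hp]

theorem isF_append_self (cs : List Char) (x : Char) :
    isF (cs ++ [x]) cs.length = !(cs.contains x) := by
  have hx : (cs ++ [x]).getD cs.length ' ' = x := by
    simp [List.getD_eq_getElem?_getD]
  rw [isF, List.take_append_of_le_length (le_refl _), List.take_length, hx]

theorem startsFrom_append (cs : List Char) (x : Char) :
    startsFrom (cs ++ [x]) 0 =
      startsFrom cs 0 ++ (if cs.contains x then [] else [((cs.length : Int), x)]) := by
  rw [startsFrom, startsFrom]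
  simp only [List.length_append, List.length_cons, List.length_nil, Nat.sub_zero]
  have hsp : List.range' 0 (cs.length + 1) = List.range' 0 cs.length ++ [cs.length] := by
    rw [List.range'_concat]
    simp
  rw [hsp, List.filter_append, List.map_append]
  congr 1
  · have hf : (List.range' 0 cs.length).filter (isF (cs ++ [x]))
        = (List.range' 0 cs.length).filter (isF cs) := by
      apply List.filter_congr
      intro p hp
      rw [List.mem_range'_1] at hp
      exact isF_append_lt cs x p (by omega)
    rw [hf]
    apply List.map_congr_left
    intro p hp
    have hp' : p < cs.length := by
      have := List.mem_range'_1.1 (List.mem_of_mem_filter hp)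
      omega
    simp [List.getElem?_append_left hp']
  · rw [List.filter_singleton]
    by_cases hx : x ∈ cs
    · simp [isF_append_self, hx]
    · have hg : (cs ++ [x]).getD cs.length ' ' = x := by
        simp [List.getD_eq_getElem?_getD]
      simp [isF_append_self, hx, hg]

theorem triple_spec (cs : List Char) :
    (PySem.List.enumerate cs 0).foldl
      (fun (t : PySem.Dict Char Int × PySem.Set Char × List (Int × Char)) p =>
        (t.1.insert p.2 p.1, PySem.Set.add t.2.1 p.2,
          if PySem.Set.contains t.2.1 p.2 then t.2.2 else t.2.2 ++ [p]))
      (PySem.Dict.empty, PySem.Set.empty, [])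
    = (lastDict cs, PySem.Set.ofList cs, startsFrom cs 0) := by
  induction cs using List.reverseRecOn with
  | nil => rfl
  | append_singleton cs x ih =>
    rw [PySem.List.enumerate_append, List.foldl_append, ih]
    simp only [PySem.List.enumerate_cons, PySem.List.enumerate_nil, List.foldl_cons,
      List.foldl_nil]
    have hadd : PySem.Set.add (PySem.Set.ofList cs) x = PySem.Set.ofList (cs ++ [x]) :=
      (PySem.Set.ofList_append_singleton cs x).symm
    have hd : (lastDict cs).insert x ((cs.length : Int)) = lastDict (cs ++ [x]) :=
      (lastDict_append cs x).symm
    have hcont : PySem.Set.contains (PySem.Set.ofList cs) x = cs.contains x := by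
      rw [PySem.Set.contains_eq_listContains]
      by_cases hx : x ∈ cs
      · simp [List.contains_iff_mem, hx, PySem.Set.mem_ofList]
      · simp [List.contains_iff_mem, hx, PySem.Set.mem_ofList]
    rw [startsFrom_append]
    by_cases hx : x ∈ cs
    · have hof : PySem.Set.ofList (cs ++ [x]) = PySem.Set.ofList cs := by
        rw [← hadd]
        exact PySem.Set.add_of_mem ((PySem.Set.mem_ofList _ _).2 hx)
      have hxc : cs.contains x = true := by simpa using hx
      simp [hcont, hxc, hx, hof, hd]
    · have hof : PySem.Set.ofList (cs ++ [x]) = PySem.Set.ofList cs ++ [x] := by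
        rw [← hadd]
        exact PySem.Set.add_of_not_mem (fun hc => hx ((PySem.Set.mem_ofList _ _).1 hc))
      have hxc : cs.contains x = false := by simpa using hx
      simp [hcont, hxc, hx, hof, hd]

theorem A_loop (cs : List Char) :
    ∀ (m k : Nat) (res : List Int) (lo : Int), k + m = cs.length →
      ((PySem.List.pyRange (k : Int) (cs.length : Int) 1).foldl (stepA cs)
        (res, (lo, max (k : Int) (Gp cs k)))).1
      = res ++ sizesFrom lo (cutsFrom cs k) := by
  intro m
  induction m with
  | zero =>
    intro k res lo hk
    have hkn : k = cs.length := by omega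
    subst hkn
    rw [PySem.List.pyRange_one_eq_nil (le_refl _)]
    simp [cutsFrom, sizesFrom]
  | succ m ih =>
    intro k res lo hk
    have hkn : k < cs.length := by omega
    rw [PySem.List.pyRange_one_cons (by exact_mod_cast hkn), List.foldl_cons]
    have hLI : (lastDict cs).getD (PySem.List.pyGetD cs (k : Int) ' ') 0 = LI cs k := by
      rw [PySem.List.pyGetD_natCast]
      rfl
    have hup : max (max (k : Int) (Gp cs k)) (LI cs k) = max (k : Int) (Gp cs (k + 1)) := by
      rw [Gp_succ cs k hkn, max_assoc]
    by_cases hcut : Gp cs (k + 1) = (k : Int)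
    · have hup' : max (max (k : Int) (Gp cs k)) (LI cs k) = (k : Int) := by
        rw [hup, hcut, max_self]
      have hstep : stepA cs (res, (lo, max (k : Int) (Gp cs k))) (k : Int)
          = (res ++ [(k : Int) - lo + 1], ((k : Int) + 1, (k : Int) + 1)) := by
        rw [stepA]
        simp only [hLI, hup']
        simp
      rw [hstep]
      have hcast : ((k : Int) + 1) = ((k + 1 : Nat) : Int) := by push_cast; ring
      have hmax : ((k + 1 : Nat) : Int) = max ((k + 1 : Nat) : Int) (Gp cs (k + 1)) := by
        rw [max_eq_left]
        rw [hcut]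
        push_cast
        omega
      have hih := ih (k + 1) (res ++ [(k : Int) - lo + 1]) ((k + 1 : Nat) : Int) (by omega)
      rw [← hmax] at hih
      rw [hcast, hih]
      rw [cuts_split cs k k (le_refl _) hkn (fun p h1 h2 => absurd (lt_of_le_of_lt h1 h2) (lt_irrefl _)) hcut]
      rw [sizesFrom]
      push_cast
      simp
    · have hge := Gp_ge cs k hkn
      have hgt : (k : Int) < Gp cs (k + 1) := lt_of_le_of_ne hge (Ne.symm hcut)
      have hup' : max (max (k : Int) (Gp cs k)) (LI cs k) = Gp cs (k + 1) := by
        rw [hup]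
        exact max_eq_right hge
      have hstep : stepA cs (res, (lo, max (k : Int) (Gp cs k))) (k : Int)
          = (res, (lo, Gp cs (k + 1))) := by
        rw [stepA]
        simp only [hLI, hup']
        rw [if_neg]
        simp only [beq_iff_eq]
        omega
      rw [hstep]
      have hcast : ((k : Int) + 1) = ((k + 1 : Nat) : Int) := by push_cast; ring
      have hmax : Gp cs (k + 1) = max ((k + 1 : Nat) : Int) (Gp cs (k + 1)) := by
        rw [max_eq_right]
        push_cast
        omega
      have hih := ih (k + 1) res lo (by omega)
      rw [← hmax] at hih
      rw [hcast, hih]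
      rw [cutsFrom_succ_no cs k hkn hcut]

theorem B_loop (cs : List Char) :
    ∀ (m q stN : Nat) (en : Int) (res : List Int), q + m = cs.length →
      en = Gp cs q → stN + 1 ≤ q →
      (∀ p : Nat, stN ≤ p → p + 1 < q → Gp cs (p + 1) ≠ (p : Int)) →
      finishB ((startsFrom cs q).foldl (stepB cs) (res, some ((stN : Int), en)))
      = res ++ sizesFrom (stN : Int) (cutsFrom cs stN) := by
  intro m
  induction m with
  | zero =>
    intro q stN en res hq hen hst hnc
    have hqn : q = cs.length := by omega
    subst hqn
    have hn : 0 < cs.length := by omega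
    have hnil : startsFrom cs cs.length = [] := by
      rw [startsFrom]
      simp
    rw [hnil, List.foldl_nil, finishB]
    have htop : en = (cs.length : Int) - 1 := by rw [hen, Gp_top cs hn]
    have hsplit : cutsFrom cs stN = (cs.length - 1) :: cutsFrom cs cs.length := by
      have h1 : (cs.length - 1) + 1 = cs.length := by omega
      rw [← h1]
      apply cuts_split cs stN (cs.length - 1) (by omega) (by omega)
      · intro p h1 h2
        exact hnc p h1 (by omega)
      · rw [h1, Gp_top cs hn]
        push_cast [hn]
        ring
    have hnil2 : cutsFrom cs cs.length = [] := by
      rw [cutsFrom]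
      simp
    rw [hsplit, hnil2, sizesFrom, sizesFrom]
    have : ((cs.length - 1 : Nat) : Int) = (cs.length : Int) - 1 := by push_cast [hn]; ring
    rw [this, htop]
  | succ m ih =>
    intro q stN en res hq hen hst hnc
    have hqn : q < cs.length := by omega
    have hq1 : 1 ≤ q := by omega
    rw [startsFrom_succ cs q hqn]
    by_cases hF : isF cs q
    · simp only [hF, if_true, List.singleton_append, List.foldl_cons]
      have hstepB : stepB cs (res, some ((stN : Int), en)) ((q : Int), cs.getD q ' ')
          = if (q : Int) ≤ en then (res, some ((stN : Int), max en (LI cs q)))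
            else (res ++ [en - (stN : Int) + 1], some ((q : Int), LI cs q)) := rfl
      by_cases hle : (q : Int) ≤ en
      · rw [hstepB, if_pos hle]
        have hen' : max en (LI cs q) = Gp cs (q + 1) := by
          rw [hen, Gp_succ cs q hqn]
        have hnc' : ∀ p : Nat, stN ≤ p → p + 1 < q + 1 → Gp cs (p + 1) ≠ (p : Int) := by
          intro p h1 h2
          by_cases hpq : p + 1 < q
          · exact hnc p h1 hpq
          · have hpe : p + 1 = q := by omega
            intro hcon
            rw [hpe] at hcon
            rw [hen, hcon] at hle
            have : (p : Int) + 1 ≤ (p : Int) := by exact_mod_cast (hpe ▸ hle)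
            omega
        exact ih (q + 1) stN (max en (LI cs q)) res (by omega) (by rw [hen']) (by omega) hnc'
      · rw [hstepB, if_neg hle]
        have hgeq : ((q - 1 : Nat) : Int) ≤ Gp cs q := by
          have h1 : (q - 1) + 1 = q := by omega
          have := Gp_ge cs (q - 1) (by omega)
          rwa [h1] at this
        have hen1 : en = (q : Int) - 1 := by
          have : ((q - 1 : Nat) : Int) = (q : Int) - 1 := by push_cast [hq1]; ring
          rw [this] at hgeq
          rw [hen]
          omega
        have hcut : Gp cs ((q - 1) + 1) = ((q - 1 : Nat) : Int) := by
          have h1 : (q - 1) + 1 = q := by omega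
          rw [h1, ← hen, hen1]
          push_cast [hq1]
          ring
        have hLIq := LI_bounds cs q hqn
        have hen' : LI cs q = Gp cs (q + 1) := by
          rw [Gp_succ cs q hqn, ← hen, hen1, max_eq_right (by omega)]
        have hnc' : ∀ p : Nat, (q : Nat) ≤ p → p + 1 < q + 1 → Gp cs (p + 1) ≠ (p : Int) := by
          intro p h1 h2
          omega
        have hih := ih (q + 1) q (LI cs q) (res ++ [en - (stN : Int) + 1]) (by omega)
          (by rw [hen']) (by omega) hnc'
        rw [hih]
        have hsplit : cutsFrom cs stN = (q - 1) :: cutsFrom cs q := by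
          have h1 : (q - 1) + 1 = q := by omega
          have := cuts_split cs stN (q - 1) (by omega) (by omega)
            (fun p ha hb => hnc p ha (by omega)) hcut
          rwa [h1] at this
        rw [hsplit, sizesFrom]
        have h2 : ((q - 1 : Nat) : Int) = (q : Int) - 1 := by push_cast [hq1]; ring
        rw [h2]
        have h3 : (q : Int) - 1 - (stN : Int) + 1 = en - (stN : Int) + 1 := by omega
        have h4 : (q : Int) - 1 + 1 = (q : Int) := by ring
        rw [h3, h4]
        simp
    · simp only [hF, if_false, Bool.false_eq_true, List.nil_append]
      have hF' : isF cs q = false := by simpa using hF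
      have hen' : en = Gp cs (q + 1) := by
        rw [hen, Gp_const_nonfirst cs q hqn hF']
      have hnc' : ∀ p : Nat, stN ≤ p → p + 1 < q + 1 → Gp cs (p + 1) ≠ (p : Int) := by
        intro p h1 h2
        by_cases hpq : p + 1 < q
        · exact hnc p h1 hpq
        · have hpe : p + 1 = q := by omega
          intro hcon
          have hfq : isF cs q = true := by
            have := first_after_cut cs p (by omega) hcon
            rwa [hpe] at this
          rw [hF'] at hfq
          exact Bool.false_ne_true hfq
      exact ih (q + 1) stN en res (by omega) hen' (by omega) hnc' 

theorem solve_eq_sizes (s : String) :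
    solve s = sizesFrom 0 (cutsFrom s.toList 0) := by
  have h := A_loop s.toList s.toList.length 0 [] 0 (by omega)
  have h0 : Gp s.toList 0 = 0 := by simp [Gp]
  rw [h0] at h
  norm_num at h
  simp only [solve]
  rw [PySem.List.enumerate_eq_map_pyRange _ ' ', List.foldl_map]
  exact h

theorem solve_alt_eq_sizes (s : String) :
    solve_alt s = sizesFrom 0 (cutsFrom s.toList 0) := by
  by_cases hnil : s.toList = []
  · simp [solve_alt, hnil, PySem.List.enumerate_nil, cutsFrom, sizesFrom]
  · have hn : 0 < s.toList.length := List.length_pos_iff.2 hnil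
    have key : solve_alt s = finishB ((startsFrom s.toList 0).foldl (stepB s.toList) ([], none)) := by
      simp only [solve_alt]
      rw [triple_spec]
      rfl
    rw [key]
    have hF0 : isF s.toList 0 = true := by simp [isF]
    have hs0 : startsFrom s.toList 0
        = ((0 : Int), s.toList.getD 0 ' ') :: startsFrom s.toList 1 := by
      rw [startsFrom_succ s.toList 0 hn, hF0]
      simp
    rw [hs0, List.foldl_cons]
    have hstep0 : stepB s.toList ([], none) ((0 : Int), s.toList.getD 0 ' ')
        = ([], some ((0 : Int), LI s.toList 0)) := rfl
    rw [hstep0]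
    have hen : LI s.toList 0 = Gp s.toList 1 := by
      rw [Gp_succ s.toList 0 hn]
      have h0 : Gp s.toList 0 = 0 := by simp [Gp]
      rw [h0]
      exact (max_eq_right (by exact_mod_cast (LI_bounds s.toList 0 hn).1)).symm
    have h := B_loop s.toList (s.toList.length - 1) 1 0 (LI s.toList 0) [] (by omega) hen
      (by omega) (by intro p h1 h2; omega)
    norm_num at h
    rw [h]

-- ===== VERDICT (by name: the statement is the Claim_ definition above) =====
theorem solve_spec : Claim_equal_solve := by
  intro s _
  unfold Spec_solve
  rw [solve_eq_sizes, solve_alt_eq_sizes]
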